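-- pv_equiv track=rewrite | github.com/limdongjin/ProblemSolving | Programmers/12899.py | solution
-- ===== SOURCE A (Python) =====
-- def solution(n):
--     ptmap = [1]
--     for i in range(1, 19):
--         ptmap.append(ptmap[i-1] + pow(3, i))
--     d = 0
--     res = 0
--     for t in ptmap:
--         if t > n:
--             break
--         d += 1
--         res = n - t
--     result = ["1"]*d
--     result_len = len(result)
--     if res == 0:
--         return "".join(result)
--     for dd in range(d, -1, -1):
--         pow_dd = pow(3, dd)
--         for i in range(0, 3):
--             if res - pow_dd < 0:
--                 break
--             idx = result_len - dd - 1
--             res -= pow_dd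
--             result[idx] = str(int(result[idx]) + 1)
--             if result[idx] == "3":
--                 result[idx] = "4"
--     return "".join(result)
-- ===== SOURCE B (Python) =====
-- def solution(n):
--     s = ""
--     while n > 0:
--         n -= 1
--         s = "124"[n % 3] + s
--         n //= 3
--     return s
-- ===== Notes on version B (the rewrite author's own statement) =====
-- stated objective: simpler
-- what changed: Replaces A's 19-entry cumulative-power threshold table plus nested greedy subtraction loops over a mutable digit-string array by the standard bijective base-3 conversion (n -= 1; n % 3 picks the digit; n //= 3), building the string back-to-front.
-- intended difference: For n >= 1743392200 (numbers whose 124-representation needs 20 digits, still inside the declared |n| <= 2^31 domain) A's hard-coded 19-entry power table truncates and A returns a wrong 19-digit string (e.g. A(1743392200)='1111111111111111112'), while B returns the correct 20-digit representation '11111111111111111111', which is the intended value of the conversion. — e.g. on solution(1743392200): A returns "1111111111111111112", B returns "11111111111111111111"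
import Mathlib
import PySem

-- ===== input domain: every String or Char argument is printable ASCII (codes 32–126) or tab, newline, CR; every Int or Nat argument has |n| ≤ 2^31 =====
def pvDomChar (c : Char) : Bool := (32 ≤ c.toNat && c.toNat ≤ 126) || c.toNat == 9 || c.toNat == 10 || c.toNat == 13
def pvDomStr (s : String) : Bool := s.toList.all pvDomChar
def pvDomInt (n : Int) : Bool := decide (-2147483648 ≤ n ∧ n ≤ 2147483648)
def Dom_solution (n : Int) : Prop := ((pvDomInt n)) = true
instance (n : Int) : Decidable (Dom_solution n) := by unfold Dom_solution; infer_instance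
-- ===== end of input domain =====

-- B replaces A's cumulative-power threshold table and nested subtraction loops by the
-- standard bijective base-3 conversion; for n ≥ 1743392200 A's 19-entry table truncates
-- and B returns the intended 20-digit string (see D_solution below).


-- ===== PORT A =====
-- ptmap = [1]; for i in range(1, 19): ptmap.append(ptmap[i-1] + pow(3, i))
-- (index i-1 is always in range, so the total pyGetD form is exact; i ≥ 1 so 3^i = 3^i.toNat)
def ptmapA : List Int :=
  (PySem.List.pyRange 1 19).foldl
    (fun acc i => acc ++ [(PySem.List.pyGetD acc (i - 1) 0) + 3 ^ i.toNat]) [1]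

-- first loop: for t in ptmap: if t > n: break; d += 1; res = n - t
def loop1 : List Int → Int → Int → Int → Int × Int
  | [], _, d, res => (d, res)
  | t :: ts, n, d, res => if t > n then (d, res) else loop1 ts n (d + 1) (n - t)

-- result[idx] = str(int(result[idx]) + 1); if result[idx] == "3": result[idx] = "4"
-- (int(result[idx]) always parses, so the .getD 0 form is exact)
def bumpStr (s : String) : String :=
  let s' := PySem.Int.toStr ((PySem.Int.ofStr? s).getD 0 + 1)
  if s' = "3" then "4" else s'

-- inner loop: for i in range(0, 3): if res - pow_dd < 0: break; … (fuel-3 recursion = 3 iterations with break)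
-- (idx may be -1; pyGetD/pySetD give Python's negative-index semantics, always in range here)
def inner3 (powdd dd rlen : Int) : Nat → Int × List String → Int × List String
  | 0, st => st
  | k + 1, st =>
    if st.1 - powdd < 0 then st
    else
      let idx := rlen - dd - 1
      inner3 powdd dd rlen k
        (st.1 - powdd, PySem.List.pySetD st.2 idx (bumpStr (PySem.List.pyGetD st.2 idx "0")))

def solution (n : Int) : String :=
  let p := loop1 ptmapA n 0 0
  let d := p.1
  let res := p.2
  let result := PySem.List.pyRepeat ["1"] d
  let result_len : Int := (result.length : Int)
  if res = 0 then PySem.Str.join "" result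
  else
    let q := (PySem.List.pyRange d (-1) (-1)).foldl
      (fun st dd => inner3 (3 ^ dd.toNat) dd result_len 3 st) (res, result)
    PySem.Str.join "" q.2

-- ===== PORT B =====
-- while n > 0: n -= 1; s = "124"[n % 3] + s; n //= 3   (nonnegative n, so Nat division/mod are exact)
-- fuel-structural while loop: the value strictly decreases, so n.toNat fuel suffices
def altGo : Nat → Nat → List Char → List Char
  | 0, _, s => s
  | _ + 1, 0, s => s
  | f + 1, m + 1, s => altGo f (m / 3) ((['1', '2', '4'].getD (m % 3) '1') :: s)

def solution_alt (n : Int) : String := String.ofList (altGo n.toNat n.toNat [])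

-- ===== PRECONDITION & SPEC =====
-- For n ≥ 1743392200 (numbers whose 124-representation needs 20 digits, still inside the
-- declared |n| ≤ 2^31 domain) A's hard-coded 19-entry power table truncates and A returns a
-- wrong 19-digit string, while B returns the correct 20-digit representation, the intended value.
def D_solution (n : Int) : Prop := 1743392200 ≤ n
instance (n : Int) : Decidable (D_solution n) := by unfold D_solution; infer_instance

def Spec_solution (n : Int) (out : String) : Prop := ¬ D_solution n → out = solution_alt n
instance (n : Int) (out : String) : Decidable (Spec_solution n out) := by unfold Spec_solution; infer_instance

def pvDiffWitness_solution : Int := (1743392200)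
def pvDiffWitnessOut_solution : String × String := ("1111111111111111112", "11111111111111111111")

-- ===== CLAIM (what is proved, stated in full; the proofs are below) =====
def Claim_unchanged_solution : Prop := ∀ (n : Int), Dom_solution n → Spec_solution n (solution n)
def Claim_changed_solution : Prop := Dom_solution (pvDiffWitness_solution) ∧ D_solution (pvDiffWitness_solution) ∧ solution (pvDiffWitness_solution) = pvDiffWitnessOut_solution.1 ∧ solution_alt (pvDiffWitness_solution) = pvDiffWitnessOut_solution.2 ∧ pvDiffWitnessOut_solution.1 ≠ pvDiffWitnessOut_solution.2
def Claim_exact_solution : Prop := ∀ (n : Int), Dom_solution n → D_solution n → solution n ≠ solution_alt n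

-- ===== LEMMAS AND PROOFS =====

-- cumulative table entries: pt k = 1 + 3 + … + 3^(k+1-1)
def pt : Nat → Int
  | 0 => 1
  | k + 1 => pt k + 3 ^ (k + 1)

-- big-endian base-3 digits of r, padded to m positions (r < 3^m)
def db : Nat → Nat → List Nat
  | 0, _ => []
  | m + 1, r => (r / 3 ^ m) :: db m (r % 3 ^ m)

-- little-endian bijective base-3 digits (0,1,2 meaning digit value 1,2,3)
def digsB : Nat → List Nat
  | 0 => []
  | m + 1 => (m % 3) :: digsB (m / 3)
  decreasing_by exact Nat.lt_succ_of_le (Nat.div_le_self m 3)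

-- value of a little-endian bijective digit list
def valL : List Nat → Int
  | [] => 0
  | q :: l => 1 + q + 3 * valL l

def dchar (q : Nat) : Char := ['1', '2', '4'].getD q '1'
def dstr (q : Nat) : String := if q = 2 then "4" else if q = 1 then "2" else "1"

lemma two_pt (k : Nat) : 2 * pt k = 3 ^ (k + 1) - 1 := by
  induction k with
  | zero => decide
  | succ k ih => simp only [pt]; rw [mul_add]; rw [ih]; ring

lemma pt_mono {j k : Nat} (h : j ≤ k) : pt j ≤ pt k := by
  induction k with
  | zero => interval_cases j; exact le_refl _
  | succ k ih =>
    rcases Nat.lt_or_ge j (k+1) with h' | h'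
    · have := ih (by omega)
      have h3 : (0:Int) < 3 ^ (k+1) := by positivity
      simp only [pt]; omega
    · have : j = k + 1 := by omega
      subst this; exact le_refl _

lemma ptmapA_eq : ptmapA = (List.range 19).map pt := by decide

lemma loop1_go : ∀ (c j D : Nat), j + c = 19 → j ≤ D → D ≤ 19 →
    ∀ (n : Int), (∀ k, k < D → pt k ≤ n) → (D < 19 → n < pt D) →
    ∀ (d0 res0 : Int),
      loop1 ((List.range' j c).map pt) n d0 res0 =
        (d0 + ((D - j : Nat) : Int), if j < D then n - pt (D - 1) else res0) := by
  intro c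
  induction c with
  | zero =>
    intro j D hc hjD hD n hlow hhigh d0 res0
    have hj : j = 19 := by omega
    have hDe : D = 19 := by omega
    subst hj; subst hDe
    simp [loop1]
  | succ c ih =>
    intro j D hc hjD hD n hlow hhigh d0 res0
    rw [List.range'_succ, List.map_cons]
    show (if pt j > n then (d0, res0) else loop1 ((List.range' (j+1) c).map pt) n (d0+1) (n - pt j)) = _
    by_cases h : j < D
    · have h1 : pt j ≤ n := hlow j h
      rw [if_neg (by omega)]
      rw [ih (j+1) D (by omega) (by omega) hD n hlow hhigh (d0+1) (n - pt j)]
      by_cases h2 : j + 1 < D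
      · rw [if_pos h2, if_pos h]
        have he : ((D - (j+1) : Nat) : Int) + 1 = ((D - j : Nat) : Int) := by omega
        rw [Prod.mk.injEq]
        omega
      · have hDj : D = j + 1 := by omega
        subst hDj
        rw [if_neg (by omega), if_pos h]
        simp
    · have hjd : j = D := by omega
      subst hjd
      have h2 : n < pt j := hhigh (by omega)
      rw [if_pos (by omega)]
      simp

lemma exists_D_aux : ∀ (m : Nat), ∀ n : Int, 1 ≤ n → n < pt m →
    ∃ D : Nat, 1 ≤ D ∧ D ≤ m ∧ pt (D - 1) ≤ n ∧ n < pt D := by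
  intro m
  induction m with
  | zero =>
    intro n h1 h2
    exfalso
    have h3 : (0:Int) < 3 ^ 1 := by norm_num
    have := two_pt 0
    simp [pt] at h2
    omega
  | succ m ih =>
    intro n h1 h2
    by_cases h : n < pt m
    · obtain ⟨D, hs1, hs2, hs3, hs4⟩ := ih n h1 h
      exact ⟨D, hs1, by omega, hs3, hs4⟩
    · refine ⟨m + 1, by omega, le_refl _, ?_, h2⟩
      simpa using not_lt.mp h

lemma exists_D (n : Int) (h1 : 1 ≤ n) (h2 : n < pt 19) :
    ∃ D : Nat, 1 ≤ D ∧ D ≤ 19 ∧ pt (D - 1) ≤ n ∧ n < pt D :=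
  exists_D_aux 19 n h1 h2

lemma loop1_spec (n : Int) (D : Nat) (hD1 : 1 ≤ D) (hD19 : D ≤ 19)
    (hlow : pt (D - 1) ≤ n) (hhigh : D < 19 → n < pt D) :
    loop1 ptmapA n 0 0 = ((D : Int), n - pt (D - 1)) := by
  have hlow' : ∀ k, k < D → pt k ≤ n := fun k hk =>
    le_trans (pt_mono (by omega : k ≤ D - 1)) hlow
  rw [ptmapA_eq, List.range_eq_range']
  rw [loop1_go 19 0 D (by omega) (by omega) hD19 n hlow' hhigh 0 0]
  rw [if_pos (by omega)]
  simp

lemma valL_nonneg (l : List Nat) : 0 ≤ valL l := by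
  induction l with
  | nil => simp [valL]
  | cons q l ih => simp only [valL]; positivity

lemma uniq (l1 : List Nat) : ∀ l2, (∀ q ∈ l1, q < 3) → (∀ q ∈ l2, q < 3) →
    valL l1 = valL l2 → l1 = l2 := by
  induction l1 with
  | nil =>
    intro l2 _ h2 hv
    cases l2 with
    | nil => rfl
    | cons q l =>
      exfalso
      have := valL_nonneg l
      simp only [valL] at hv
      omega
  | cons q1 t1 ih =>
    intro l2 h1 h2 hv
    cases l2 with
    | nil =>
      exfalso
      have := valL_nonneg t1
      simp only [valL] at hv
      omega
    | cons q2 t2 =>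
      have hq1 : q1 < 3 := h1 q1 (by simp)
      have hq2 : q2 < 3 := h2 q2 (by simp)
      have hv1 := valL_nonneg t1
      have hv2 := valL_nonneg t2
      simp only [valL] at hv
      have hq : q1 = q2 := by omega
      have hrest : valL t1 = valL t2 := by omega
      subst hq
      rw [ih t2 (fun q hq => h1 q (by simp [hq])) (fun q hq => h2 q (by simp [hq])) hrest]

lemma valL_digsB : ∀ m : Nat, valL (digsB m) = (m : Int) := by
  intro m
  induction m using Nat.strong_induction_on with
  | _ m ih =>
    match m with
    | 0 => simp [digsB, valL]
    | k + 1 =>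
      rw [digsB]
      simp only [valL]
      rw [ih (k / 3) (by omega)]
      have := Nat.div_add_mod k 3
      push_cast
      omega

lemma digsB_lt : ∀ m : Nat, ∀ q ∈ digsB m, q < 3 := by
  intro m
  induction m using Nat.strong_induction_on with
  | _ m ih =>
    match m with
    | 0 => simp [digsB]
    | k + 1 =>
      rw [digsB]
      intro q hq
      rcases List.mem_cons.mp hq with h | h
      · omega
      · exact ih (k / 3) (by omega) q h

lemma altGo_eq : ∀ (f m : Nat) (s : List Char), m ≤ f →
    altGo f m s = (digsB m).reverse.map dchar ++ s := by
  intro f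
  induction f with
  | zero =>
    intro m s hm
    have : m = 0 := by omega
    subst this
    simp [altGo, digsB]
  | succ f ih =>
    intro m s hm
    match m with
    | 0 => simp [altGo, digsB]
    | k + 1 =>
      show altGo f (k / 3) (dchar (k % 3) :: s) = _
      rw [ih (k / 3) _ (by omega)]
      rw [digsB]
      simp

lemma db_lt : ∀ (m R : Nat), R < 3 ^ m → ∀ q ∈ db m R, q < 3 := by
  intro m
  induction m with
  | zero => intro R _ q hq; simp [db] at hq
  | succ m ih =>
    intro R hR q hq
    have hpos : 0 < 3 ^ m := by positivity
    rcases List.mem_cons.mp hq with h | h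
    · subst h
      have : R < 3 * 3 ^ m := by rw [pow_succ] at hR; omega
      exact Nat.div_lt_of_lt_mul (by omega)
    · exact ih (R % 3 ^ m) (Nat.mod_lt _ hpos) q h

lemma db_length : ∀ (m R : Nat), (db m R).length = m := by
  intro m
  induction m with
  | zero => intro R; simp [db]
  | succ m ih => intro R; simp [db, ih]

lemma valL_append_singleton (l : List Nat) (q : Nat) :
    valL (l ++ [q]) = valL l + (1 + q) * 3 ^ l.length := by
  induction l with
  | nil => simp [valL]
  | cons a t ih =>
    simp only [List.cons_append, valL, ih, List.length_cons]
    push_cast [pow_succ]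
    ring

lemma two_valL_rep : ∀ m : Nat, 2 * valL (List.replicate m 0) = 3 ^ m - 1 := by
  intro m
  induction m with
  | zero => simp [valL]
  | succ m ih =>
    rw [List.replicate_succ]
    simp only [valL]
    push_cast [pow_succ]
    omega

lemma valL_rep_pt : ∀ m : Nat, valL (List.replicate (m + 1) 0) = pt m := by
  intro m
  induction m with
  | zero => simp [valL, pt]
  | succ m ih =>
    rw [List.replicate_succ]
    simp only [valL]
    rw [ih]
    have h2 := two_pt m
    simp only [pt]
    push_cast
    omega

lemma val_rev_db : ∀ (m R : Nat), R < 3 ^ m →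
    valL ((db m R).reverse) = valL (List.replicate m 0) + R := by
  intro m
  induction m with
  | zero =>
    intro R hR
    have : R = 0 := by omega
    subst this
    simp [db, valL]
  | succ m ih =>
    intro R hR
    have hpos : 0 < 3 ^ m := by positivity
    rw [db]
    rw [List.reverse_cons]
    rw [valL_append_singleton]
    rw [ih (R % 3 ^ m) (Nat.mod_lt _ hpos)]
    rw [List.length_reverse, db_length]
    rw [List.replicate_succ]
    simp only [valL]
    have hdm := Nat.div_add_mod R (3 ^ m)
    have h2 := two_valL_rep m
    set P := valL (List.replicate m 0) with hP
    have hcast : ((3 ^ m : Nat) : Int) * ((R / 3 ^ m : Nat) : Int) + ((R % 3 ^ m : Nat) : Int) = (R : Int) := by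
      exact_mod_cast congrArg (Nat.cast : Nat → Int) hdm
    push_cast at hcast h2 ⊢
    nlinarith [hcast, h2]

-- the descending list [m-1, …, 0]
def Ldesc (m : Nat) : List Int := (List.range m).map (fun k => ((m - 1 - k : Nat) : Int))

lemma Ldesc_succ (m : Nat) : Ldesc (m + 1) = (m : Int) :: Ldesc m := by
  unfold Ldesc
  rw [List.range_succ_eq_map, List.map_cons, List.map_map]
  congr 1
  apply List.map_congr_left
  intro k hk
  simp only [Function.comp_apply, Nat.succ_eq_add_one]
  congr 1
  omega

lemma pyRangeDown (D : Nat) :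
    PySem.List.pyRange (D : Int) (-1) (-1) = (D : Int) :: Ldesc D := by
  unfold PySem.List.pyRange Ldesc
  rw [if_neg (by norm_num), if_neg (by norm_num), if_pos (show (-1:Int) < D by omega)]
  have hc : (((D:Int) - -1 + - -1 - 1) / - -1).toNat = D + 1 := by norm_num
  rw [hc]
  show List.map (fun k => (D:Int) + -1 * ↑k) (List.range (D+1)) = _
  rw [List.range_succ_eq_map, List.map_cons, List.map_map]
  congr 1
  apply List.map_congr_left
  intro k hk
  rw [List.mem_range] at hk
  simp only [Function.comp_apply, Nat.succ_eq_add_one]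
  omega

lemma getAt (done rest : List String) (x : String) :
    PySem.List.pyGetD (done ++ x :: rest) ((done.length : Int)) "0" = x := by
  rw [PySem.List.pyGetD_of_nonneg _ _ (by positivity)]
  rw [Int.toNat_natCast]
  rw [List.getD_append_right _ _ _ _ (le_refl _)]
  simp

lemma setAt (done rest : List String) (x v : String) :
    PySem.List.pySetD (done ++ x :: rest) ((done.length : Int)) v = done ++ v :: rest := by
  rw [PySem.List.pySetD_of_nonneg _ _ (by positivity)]
  rw [Int.toNat_natCast]
  induction done with
  | nil => simp
  | cons a t ih => simpa using ih

lemma bump1 : bumpStr "1" = "2" := by decide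

-- the value a cell with current content c shows after q bumps (q = 0, 1, 2)
def cstr (c : String) (q : Nat) : String := [c, bumpStr c, bumpStr (bumpStr c)].getD q c

set_option maxHeartbeats 1000000 in
lemma inner3_spec' (m R : Nat) (done rest : List String) (rlen : Int) (c : String)
    (hR : R < 3 ^ (m + 1)) (hrlen : rlen = (done.length : Int) + m + 1) :
    inner3 ((3 : Int) ^ m) (m : Int) rlen 3 ((R : Int), done ++ c :: rest) =
      (((R % 3 ^ m : Nat) : Int), done ++ cstr c (R / 3 ^ m) :: rest) := by
  have hposN : 0 < 3 ^ m := by positivity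
  have hpow : ((3 ^ m : Nat) : Int) = (3 : Int) ^ m := by push_cast; ring
  have hidx : rlen - (m : Int) - 1 = (done.length : Int) := by omega
  have hbN : R < 3 * 3 ^ m := by rw [pow_succ] at hR; omega
  rw [← hpow]
  by_cases h0 : R < 3 ^ m
  · have hq : R / 3 ^ m = 0 := Nat.div_eq_of_lt h0
    have hr : R % 3 ^ m = R := Nat.mod_eq_of_lt h0
    rw [hq, hr, show cstr c 0 = c by simp [cstr]]
    simp only [inner3, hidx, getAt, setAt]
    rw [if_pos (show (R : Int) - ((3 ^ m : Nat) : Int) < 0 by omega)]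
  · by_cases h1 : R < 2 * 3 ^ m
    · have hq : R / 3 ^ m = 1 := Nat.div_eq_of_lt_le (by omega) (by omega)
      have hr : R % 3 ^ m = R - 3 ^ m := by
        have := Nat.div_add_mod R (3 ^ m)
        rw [hq] at this
        omega
      rw [hq, hr, show cstr c 1 = bumpStr c by simp [cstr]]
      simp only [inner3, hidx, getAt, setAt]
      rw [if_neg (show ¬ ((R : Int) - ((3 ^ m : Nat) : Int) < 0) by omega),
        if_pos (show (R : Int) - ((3 ^ m : Nat) : Int) - ((3 ^ m : Nat) : Int) < 0 by omega)]
      rw [Prod.mk.injEq]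
      exact ⟨by omega, rfl⟩
    · have hq : R / 3 ^ m = 2 := Nat.div_eq_of_lt_le (by omega) (by omega)
      have hr : R % 3 ^ m = R - 2 * 3 ^ m := by
        have := Nat.div_add_mod R (3 ^ m)
        rw [hq] at this
        omega
      rw [hq, hr, show cstr c 2 = bumpStr (bumpStr c) by simp [cstr]]
      simp only [inner3, hidx, getAt, setAt]
      rw [if_neg (show ¬ ((R : Int) - ((3 ^ m : Nat) : Int) < 0) by omega),
        if_neg (show ¬ ((R : Int) - ((3 ^ m : Nat) : Int) - ((3 ^ m : Nat) : Int) < 0) by omega),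
        if_pos (show (R : Int) - ((3 ^ m : Nat) : Int) - ((3 ^ m : Nat) : Int) - ((3 ^ m : Nat) : Int) < 0 by omega)]
      rw [Prod.mk.injEq]
      exact ⟨by omega, rfl⟩

lemma cstr_one (q : Nat) (h : q < 3) : cstr "1" q = dstr q := by
  interval_cases q <;> decide

lemma inner3_spec (m R : Nat) (done rest : List String) (rlen : Int)
    (hR : R < 3 ^ (m + 1)) (hrlen : rlen = (done.length : Int) + m + 1) :
    inner3 ((3 : Int) ^ m) (m : Int) rlen 3 ((R : Int), done ++ "1" :: rest) =
      (((R % 3 ^ m : Nat) : Int), done ++ dstr (R / 3 ^ m) :: rest) := by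
  rw [inner3_spec' m R done rest rlen "1" hR hrlen]
  have hq : R / 3 ^ m < 3 := by
    have hposN : 0 < 3 ^ m := by positivity
    have : R < 3 * 3 ^ m := by rw [pow_succ] at hR; omega
    exact Nat.div_lt_of_lt_mul (by omega)
  rw [cstr_one _ hq]

lemma outer_inv : ∀ (m R : Nat) (done : List String) (rlen : Int),
    R < 3 ^ m → rlen = (done.length : Int) + m →
    (Ldesc m).foldl (fun st dd => inner3 (3 ^ dd.toNat) dd rlen 3 st)
        ((R : Int), done ++ List.replicate m "1") =
      (0, done ++ (db m R).map dstr) := by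
  intro m
  induction m with
  | zero =>
    intro R done rlen hR hrlen
    have : R = 0 := by omega
    subst this
    simp [Ldesc, db]
  | succ m ih =>
    intro R done rlen hR hrlen
    rw [Ldesc_succ, List.foldl_cons, List.replicate_succ]
    rw [show ((m : Int)).toNat = m from Int.toNat_natCast m]
    rw [inner3_spec m R done (List.replicate m "1") rlen hR (by push_cast at hrlen ⊢; omega)]
    have hpos : 0 < 3 ^ m := by positivity
    have hstep := ih (R % 3 ^ m) (done ++ [dstr (R / 3 ^ m)]) rlen (Nat.mod_lt _ hpos)
      (by simp; push_cast at hrlen ⊢; omega)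
    rw [show done ++ dstr (R / 3 ^ m) :: List.replicate m "1"
          = (done ++ [dstr (R / 3 ^ m)]) ++ List.replicate m "1" by simp]
    rw [hstep, db]
    simp

lemma dstr_toList (q : Nat) (h : q < 3) : (dstr q).toList = [dchar q] := by
  interval_cases q <;> decide

lemma inner3_stop (p dd rlen : Int) (st : Int × List String) (h : st.1 - p < 0) :
    inner3 p dd rlen 3 st = st := by
  simp [inner3, h]

lemma pt_sub (D : Nat) (hD : 1 ≤ D) : pt D = pt (D - 1) + 3 ^ D := by
  match D, hD with
  | k + 1, _ => simp [pt]

lemma join_map_dstr (l : List Nat) (h : ∀ q ∈ l, q < 3) :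
    (PySem.Str.join "" (l.map dstr)).toList = l.map dchar := by
  rw [PySem.Str.toList_join]
  have h1 : (l.map dstr).map String.toList = (l.map dchar).map (fun c => [c]) := by
    rw [List.map_map, List.map_map]
    apply List.map_congr_left
    intro q hq
    exact dstr_toList q (h q hq)
  rw [h1]
  rw [show ("" : String).toList = [] from rfl]
  exact PySem.Chars.join_nil_singletons _

lemma valL_rep_eq_pt (D : Nat) (hD : 1 ≤ D) : valL (List.replicate D 0) = pt (D - 1) := by
  match D, hD with
  | k + 1, _ => simpa using valL_rep_pt k


-- ===== tightness: inside D_ the two outputs differ everywhere =====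

lemma getNeg1 (l : List String) (x : String) :
    PySem.List.pyGetD (l ++ [x]) (-1) "0" = x := by
  simp only [PySem.List.pyGetD, PySem.List.pyGet?, PySem.List.pyIdx?, List.length_append,
    List.length_cons, List.length_nil]
  rw [if_neg (by omega), if_pos (by omega)]
  simp only [show ((-(-1 : Int))).toNat = 1 from rfl, Nat.add_sub_cancel]
  simp [List.getElem?_append_right]

lemma set_at_len {α : Type} (l : List α) (x v : α) (rest : List α) :
    (l ++ x :: rest).set l.length v = l ++ v :: rest := by
  induction l with
  | nil => simp
  | cons a t ih => simp [ih]

lemma setNeg1 (l : List String) (x v : String) :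
    PySem.List.pySetD (l ++ [x]) (-1) v = l ++ [v] := by
  simp only [PySem.List.pySetD, PySem.List.pySet?, PySem.List.pyIdx?, List.length_append,
    List.length_cons, List.length_nil]
  rw [if_neg (by omega), if_pos (by omega)]
  simp only [show ((-(-1 : Int))).toNat = 1 from rfl, Nat.add_sub_cancel, Option.map_some, Option.getD_some]
  exact set_at_len l x v []

lemma inner3_one (p dd rlen : Int) (st : Int × List String)
    (h1 : ¬ st.1 - p < 0) (h2 : st.1 - p - p < 0) :
    inner3 p dd rlen 3 st =
      (st.1 - p, PySem.List.pySetD st.2 (rlen - dd - 1)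
        (bumpStr (PySem.List.pyGetD st.2 (rlen - dd - 1) "0"))) := by
  simp [inner3, h1, h2]

lemma outer_inv' : ∀ (m R : Nat) (done : List String) (rlen : Int) (c : String),
    R < 3 ^ (m + 1) → rlen = (done.length : Int) + m + 1 →
    (Ldesc (m + 1)).foldl (fun st dd => inner3 (3 ^ dd.toNat) dd rlen 3 st)
        ((R : Int), done ++ List.replicate m "1" ++ [c]) =
      (0, done ++ (db m (R / 3)).map dstr ++ [cstr c (R % 3)]) := by
  intro m
  induction m with
  | zero =>
    intro R done rlen c hR hrlen
    rw [show Ldesc 1 = [(0 : Int)] from rfl, List.foldl_cons, List.foldl_nil]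
    rw [show ((0 : Int)).toNat = 0 from rfl]
    have h := inner3_spec' 0 R done [] rlen c (by simpa using hR) (by push_cast at hrlen ⊢; omega)
    simp only [Nat.cast_zero, List.append_nil] at h
    rw [show done ++ List.replicate 0 "1" ++ [c] = done ++ [c] by simp]
    rw [h]
    have hR3 : R < 3 := by simpa using hR
    simp [db, Nat.mod_eq_of_lt hR3]
  | succ m ih =>
    intro R done rlen c hR hrlen
    rw [Ldesc_succ, List.foldl_cons]
    rw [show (((m + 1 : Nat) : Int)).toNat = m + 1 from Int.toNat_natCast _]
    rw [show done ++ List.replicate (m + 1) "1" ++ [c]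
          = done ++ "1" :: (List.replicate m "1" ++ [c]) by
        rw [List.replicate_succ]; simp]
    rw [inner3_spec' (m + 1) R done (List.replicate m "1" ++ [c]) rlen "1" hR
      (by push_cast at hrlen ⊢; omega)]
    have hq : R / 3 ^ (m + 1) < 3 := by
      have hposN : 0 < 3 ^ (m + 1) := by positivity
      have : R < 3 * 3 ^ (m + 1) := by rw [pow_succ] at hR; omega
      exact Nat.div_lt_of_lt_mul (by omega)
    rw [cstr_one _ hq]
    have hpos : 0 < 3 ^ (m + 1) := by positivity
    rw [show done ++ dstr (R / 3 ^ (m + 1)) :: (List.replicate m "1" ++ [c])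
          = (done ++ [dstr (R / 3 ^ (m + 1))]) ++ List.replicate m "1" ++ [c] by simp]
    rw [ih (R % 3 ^ (m + 1)) (done ++ [dstr (R / 3 ^ (m + 1))]) rlen c
      (Nat.mod_lt _ hpos) (by simp; push_cast at hrlen ⊢; omega)]
    have e1 : R % 3 ^ (m + 1) / 3 = R / 3 % 3 ^ m := by
      rw [show (3 : Nat) ^ (m + 1) = 3 * 3 ^ m from by rw [pow_succ]; ring]
      exact Nat.mod_mul_right_div_self R 3 (3 ^ m)
    have e2 : R % 3 ^ (m + 1) % 3 = R % 3 :=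
      Nat.mod_mod_of_dvd R (dvd_pow_self 3 (Nat.succ_ne_zero m))
    have e3 : R / 3 / 3 ^ m = R / 3 ^ (m + 1) := by
      rw [Nat.div_div_eq_div_mul]
      congr 1
      rw [pow_succ]; ring
    rw [e1, e2]
    rw [show db (m + 1) (R / 3) = (R / 3 / 3 ^ m) :: db m (R / 3 % 3 ^ m) from rfl, e3]
    simp

lemma valL_lt_pt : ∀ (l : List Nat), (∀ q ∈ l, q < 3) → valL l < pt l.length := by
  intro l
  induction l with
  | nil => intro _; simp [valL, pt]
  | cons q t ih =>
    intro h
    have hq : q < 3 := h q (by simp)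
    have ht := ih (fun x hx => h x (by simp [hx]))
    have htwo := two_pt t.length
    have hdef : pt (t.length + 1) = pt t.length + 3 ^ (t.length + 1) := by simp [pt]
    simp only [valL, List.length_cons]
    omega

lemma join_singletons (parts : List String) (chars : List Char)
    (h : parts.map String.toList = chars.map (fun c => [c])) :
    (PySem.Str.join "" parts).toList = chars := by
  rw [PySem.Str.toList_join, h, show ("" : String).toList = [] from rfl]
  exact PySem.Chars.join_nil_singletons _

-- the char a cell starting at "2" shows after r bumps
def cch (r : Nat) : Char := ['2', '4', '5'].getD r '2'

lemma cstr2_toList (r : Nat) (h : r < 3) : (cstr "2" r).toList = [cch r] := by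
  interval_cases r <;> decide

theorem main_eq (n : Int) (hD : ¬ (1743392200 ≤ n)) : solution n = solution_alt n := by
  by_cases hn : n < 1
  · -- n ≤ 0: the first table entry 1 already exceeds n, d = 0, res = 0, both return ""
    have h1 : loop1 ptmapA n 0 0 = (0, 0) := by
      rw [ptmapA_eq, List.range_eq_range']
      rw [loop1_go 19 0 0 (by omega) (le_refl 0) (by omega) n
        (fun k hk => absurd hk (by omega)) (fun _ => by simpa [pt] using hn) 0 0]
      simp
    have h2 : n.toNat = 0 := by omega
    simp only [solution, solution_alt, h1, h2]
    decide
  · replace hn : 1 ≤ n := by omega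
    have hT : n < pt 19 := by
      have : pt 19 = 1743392200 := by decide
      omega
    obtain ⟨D, hD1, hD19, hlow, hhigh⟩ := exists_D n hn hT
    have hl1 : loop1 ptmapA n 0 0 = ((D : Int), n - pt (D - 1)) :=
      loop1_spec n D hD1 hD19 hlow (fun _ => hhigh)
    have hsub := pt_sub D hD1
    have hres_nonneg : (0:Int) ≤ n - pt (D - 1) := by omega
    have hres_lt : n - pt (D - 1) < (3:Int) ^ D := by
      have : pt (D-1) + 3 ^ D = pt D := hsub.symm
      omega
    set R := (n - pt (D - 1)).toNat with hRdef
    have hRcast : (R : Int) = n - pt (D - 1) := Int.toNat_of_nonneg hres_nonneg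
    have hpowc : ((3 ^ D : Nat) : Int) = (3:Int) ^ D := by push_cast; ring
    have hRlt : R < 3 ^ D := by
      have : (R : Int) < ((3 ^ D : Nat) : Int) := by rw [hpowc]; omega
      exact_mod_cast this
    have hntn : (n.toNat : Int) = n := Int.toNat_of_nonneg (by omega)
    -- both sides as char lists
    apply String.toList_inj.mp
    have hBside : (solution_alt n).toList = (digsB n.toNat).reverse.map dchar := by
      simp only [solution_alt]
      rw [String.toList_ofList, altGo_eq n.toNat n.toNat [] (le_refl _), List.append_nil]
    simp only [solution, hl1]
    rw [PySem.List.pyRepeat_singleton]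
    rw [show ((D : Int)).toNat = D from Int.toNat_natCast D]
    by_cases hz : n - pt (D - 1) = 0
    · rw [if_pos hz]
      -- A returns "1"*D; show replicate D "1" = (replicate D 0).map dstr and use uniqueness
      have hrep : List.replicate D "1" = (List.replicate D 0).map dstr := by
        rw [List.map_replicate]; rfl
      rw [hrep, join_map_dstr _ (by intro q hq; rw [List.eq_of_mem_replicate hq]; omega)]
      rw [hBside]
      have e : List.replicate D 0 = digsB n.toNat := by
        apply uniq
        · intro q hq; rw [List.eq_of_mem_replicate hq]; omega
        · exact digsB_lt n.toNat
        · rw [valL_digsB, valL_rep_eq_pt D hD1, hntn]; omega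
      rw [← e, List.reverse_replicate, List.map_replicate]
    · rw [if_neg hz]
      rw [pyRangeDown D, List.foldl_cons]
      rw [show ((D : Int)).toNat = D from Int.toNat_natCast D]
      rw [inner3_stop _ _ _ _ (by simpa using (by omega : n - pt (D-1) - (3:Int)^D < 0))]
      rw [show ((List.replicate D "1").length : Int) = (D : Int) by simp]
      rw [← hRcast]
      have ho := outer_inv D R [] ((D : Int)) hRlt (by simp)
      simp only [List.nil_append] at ho
      rw [ho]
      rw [join_map_dstr _ (db_lt D R hRlt)]
      rw [hBside]
      have e : (db D R).reverse = digsB n.toNat := by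
        apply uniq
        · intro q hq; exact db_lt D R hRlt q (List.mem_reverse.mp hq)
        · exact digsB_lt n.toNat
        · rw [val_rev_db D R hRlt, valL_digsB, valL_rep_eq_pt D hD1, hntn]
          omega
      rw [← e, List.reverse_reverse]

-- ===== VERDICT (by name: the statement is the Claim_ definition above) =====
theorem solution_spec : Claim_unchanged_solution := by
  intro n _ hnd
  exact main_eq n hnd

set_option maxRecDepth 1000000 in
theorem solution_changed : Claim_changed_solution := by
  unfold Claim_changed_solution; decide

set_option maxRecDepth 8000 in
theorem solution_tight : Claim_exact_solution := by
  unfold Claim_exact_solution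
  intro n hdom hd heq
  simp only [Dom_solution, pvDomInt, decide_eq_true_eq] at hdom
  unfold D_solution at hd
  have hpt18 : pt 18 = 581130733 := by decide
  have hpt19 : pt 19 = 1743392200 := by decide
  have hsub19 := pt_sub 19 (by omega)
  have h319 : ((3 : Int) ^ 19) = 1162261467 := by norm_num
  have hl1 : loop1 ptmapA n 0 0 = ((19 : Int), n - pt 18) := by
    have := loop1_spec n 19 (by omega) (le_refl _) (by rw [show (19 - 1 : Nat) = 18 from rfl]; omega)
      (fun h => absurd h (by omega))
    simpa using this
  set R := (n - pt 18).toNat with hRdef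
  have hRcast : (R : Int) = n - pt 18 := Int.toNat_of_nonneg (by omega)
  have hRlo : 3 ^ 19 ≤ R := by
    have : ((3 ^ 19 : Nat) : Int) ≤ (R : Int) := by push_cast; omega
    exact_mod_cast this
  have hRhi : R < 2 * 3 ^ 19 := by
    have : (R : Int) < ((2 * 3 ^ 19 : Nat) : Int) := by push_cast; omega
    exact_mod_cast this
  simp only [solution, hl1] at heq
  rw [PySem.List.pyRepeat_singleton, show ((19 : Int)).toNat = 19 from rfl] at heq
  rw [if_neg (by omega)] at heq
  rw [show (19 : Int) = ((19 : Nat) : Int) from rfl, pyRangeDown 19, List.foldl_cons] at heq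
  rw [show ((List.replicate 19 "1").length : Int) = (((19 : Nat) : Int)) by simp] at heq
  rw [show (((19 : Nat) : Int)).toNat = 19 from rfl] at heq
  rw [← hRcast] at heq
  rw [inner3_one _ _ _ _ (by push_cast; omega) (by push_cast; omega)] at heq
  rw [show (((19 : Nat) : Int)) - ((19 : Nat) : Int) - 1 = -1 from by norm_num] at heq
  rw [show List.replicate 19 "1" = List.replicate 18 "1" ++ ["1"] from rfl] at heq
  rw [getNeg1, setNeg1, bump1] at heq
  rw [show ((R : Int), List.replicate 18 "1" ++ ["1"]).1 = (R : Int) from rfl] at heq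
  rw [show (R : Int) - 3 ^ 19 = ((R - 3 ^ 19 : Nat) : Int) from by push_cast [hRlo]; omega] at heq
  have hR' : R - 3 ^ 19 < 3 ^ (18 + 1) := by
    rw [show (3 : Nat) ^ (18 + 1) = 3 ^ 19 from rfl]
    omega
  have ho := outer_inv' 18 (R - 3 ^ 19) [] (((19 : Nat) : Int)) "2" hR' (by simp)
  rw [List.nil_append, List.nil_append] at ho
  rw [ho] at heq
  have hchars := congrArg String.toList heq
  have hdlt : ∀ q ∈ db 18 ((R - 3 ^ 19) / 3), q < 3 := by
    apply db_lt
    have : 0 < 3 := by norm_num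
    omega
  have hr3 : (R - 3 ^ 19) % 3 < 3 := Nat.mod_lt _ (by norm_num)
  rw [show (0, (db 18 ((R - 3 ^ 19) / 3)).map dstr ++ [cstr "2" ((R - 3 ^ 19) % 3)]).2
        = (db 18 ((R - 3 ^ 19) / 3)).map dstr ++ [cstr "2" ((R - 3 ^ 19) % 3)] from rfl] at hchars
  have hjoin : ((db 18 ((R - 3 ^ 19) / 3)).map dstr ++ [cstr "2" ((R - 3 ^ 19) % 3)]).map String.toList
      = ((db 18 ((R - 3 ^ 19) / 3)).map dchar ++ [cch ((R - 3 ^ 19) % 3)]).map (fun c => [c]) := by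
    rw [List.map_append, List.map_append, List.map_map, List.map_map]
    have h1 : (db 18 ((R - 3 ^ 19) / 3)).map (String.toList ∘ dstr)
        = (db 18 ((R - 3 ^ 19) / 3)).map ((fun c => [c]) ∘ dchar) := by
      apply List.map_congr_left
      intro q hq
      simpa using dstr_toList q (hdlt q hq)
    rw [h1]
    simp only [List.map_cons, List.map_nil]
    rw [cstr2_toList _ hr3]
  rw [join_singletons _ _ hjoin] at hchars
  have hBc : (solution_alt n).toList = (digsB n.toNat).reverse.map dchar := by
    simp only [solution_alt]
    rw [String.toList_ofList, altGo_eq n.toNat n.toNat [] (le_refl _), List.append_nil]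
  rw [hBc] at hchars
  have hlen := congrArg List.length hchars
  simp only [List.length_append, List.length_map, List.length_reverse, db_length,
    List.length_singleton] at hlen
  -- so digsB n.toNat has length 19, but its value n ≥ pt 19 exceeds every 19-digit value
  have hv := valL_lt_pt (digsB n.toNat) (digsB_lt n.toNat)
  rw [valL_digsB, ← hlen] at hv
  rw [show (18 + 1 : Nat) = 19 from rfl, hpt19] at hv
  have : (n.toNat : Int) = n := Int.toNat_of_nonneg (by omega)
  omega
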